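-- pv_equiv track=rewrite | github.com/TiniKhang/cfvg-discordbot | interpret.py | parse_pre
-- ===== SOURCE A (Python) =====
-- def parse_pre(data):
-- 	data = data.replace("AND",'&')
-- 	data = data.replace("XOR",'^')
-- 	data = data.replace("OR",'|')
-- 	data = data.replace("and",'&')
-- 	data = data.replace("xor",'^')
-- 	data = data.replace("or",'|')
-- 	for i in ['&','|','^','+','-','*','/',')','(']:	data = data.replace(i,' '+i+' ')
-- 	return data
-- ===== SOURCE B (Python) =====
-- def parse_pre(data):
-- 	words = (("AND", '&'), ("XOR", '^'), ("OR", '|'), ("and", '&'), ("xor", '^'), ("or", '|'))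
-- 	symbols = set('&|^+-*/()')
-- 	out = []
-- 	i = 0
-- 	n = len(data)
-- 	while i < n:
-- 		for w, s in words:
-- 			if data.startswith(w, i):
-- 				out.append(' ' + s + ' ')
-- 				i += len(w)
-- 				break
-- 		else:
-- 			c = data[i]
-- 			out.append(' ' + c + ' ' if c in symbols else c)
-- 			i += 1
-- 	return ''.join(out)
-- ===== Notes on version B (the rewrite author's own statement) =====
-- stated objective: alternative
-- what changed: A normalizes by fifteen sequential whole-string replace passes (six word-token substitutions, then nine symbol-spacing substitutions); B builds the output in a single left-to-right scan that matches the six word tokens and nine symbols at each position and emits the spaced token directly.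
import Mathlib
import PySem

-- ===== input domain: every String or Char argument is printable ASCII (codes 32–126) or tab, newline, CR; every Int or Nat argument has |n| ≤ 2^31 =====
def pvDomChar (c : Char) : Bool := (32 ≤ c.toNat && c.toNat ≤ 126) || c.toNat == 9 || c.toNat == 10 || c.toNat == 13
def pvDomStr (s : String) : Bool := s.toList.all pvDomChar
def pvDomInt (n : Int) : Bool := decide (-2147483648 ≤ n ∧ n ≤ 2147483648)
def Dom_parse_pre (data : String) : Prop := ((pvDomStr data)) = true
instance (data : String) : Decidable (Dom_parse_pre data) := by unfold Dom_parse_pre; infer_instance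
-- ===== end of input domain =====

-- B replaces A's fifteen sequential full-string `replace` passes by one left-to-right scan that
-- matches the six word tokens and nine symbols at each position; same output (alternative decomposition, not claimed faster).

-- ===== PORT A =====
def parse_pre (data : String) : String :=
  let d1 := PySem.Str.replace data "AND" "&"
  let d2 := PySem.Str.replace d1 "XOR" "^"
  let d3 := PySem.Str.replace d2 "OR" "|"
  let d4 := PySem.Str.replace d3 "and" "&"
  let d5 := PySem.Str.replace d4 "xor" "^"
  let d6 := PySem.Str.replace d5 "or" "|"
  ["&", "|", "^", "+", "-", "*", "/", ")", "("].foldl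
    (fun d i => PySem.Str.replace d i (" " ++ i ++ " ")) d6

-- ===== PORT B =====
-- the single left-to-right scan of Source B, on the code points
def parsePreScan : List Char → List Char
  | [] => []
  | c :: t =>
    if PySem.Chars.startswith (c :: t) ['A', 'N', 'D'] then
      [' ', '&', ' '] ++ parsePreScan (t.drop 2)
    else if PySem.Chars.startswith (c :: t) ['X', 'O', 'R'] then
      [' ', '^', ' '] ++ parsePreScan (t.drop 2)
    else if PySem.Chars.startswith (c :: t) ['O', 'R'] then
      [' ', '|', ' '] ++ parsePreScan (t.drop 1)
    else if PySem.Chars.startswith (c :: t) ['a', 'n', 'd'] then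
      [' ', '&', ' '] ++ parsePreScan (t.drop 2)
    else if PySem.Chars.startswith (c :: t) ['x', 'o', 'r'] then
      [' ', '^', ' '] ++ parsePreScan (t.drop 2)
    else if PySem.Chars.startswith (c :: t) ['o', 'r'] then
      [' ', '|', ' '] ++ parsePreScan (t.drop 1)
    else if c ∈ ['&', '|', '^', '+', '-', '*', '/', '(', ')'] then
      [' ', c, ' '] ++ parsePreScan t
    else
      c :: parsePreScan t
  termination_by l => l.length
  decreasing_by all_goals (simp [List.length_drop]; try omega)

def parse_pre_alt (data : String) : String := String.ofList (parsePreScan data.toList)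

-- ===== PRECONDITION & SPEC =====
def Spec_parse_pre (data : String) (out : String) : Prop := out = parse_pre_alt data
instance (data : String) (out : String) : Decidable (Spec_parse_pre data out) := by unfold Spec_parse_pre; infer_instance

-- ===== CLAIM (what is proved, stated in full; the proofs are below) =====
def Claim_equal_parse_pre : Prop := ∀ (data : String), Dom_parse_pre data → Spec_parse_pre data (parse_pre data)

-- ===== LEMMAS AND PROOFS =====

def repL (old new : List Char) : List Char → List Char
  | [] => []
  | c :: t =>
    if old.isPrefixOf (c :: t) then new ++ repL old new (t.drop (old.length - 1))
    else c :: repL old new t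
  termination_by l => l.length
  decreasing_by all_goals (simp [List.length_drop]; try omega)

theorem repL_go (old new : List Char) (hold : old ≠ []) :
    ∀ fuel l acc, l.length ≤ fuel →
      PySem.Chars.replace.go old new fuel l acc = acc.reverse ++ repL old new l := by
  intro fuel
  induction fuel with
  | zero =>
    intro l acc h
    have hl : l = [] := by cases l <;> simp_all
    subst hl
    simp [PySem.Chars.replace.go, repL]
  | succ n ih =>
    intro l acc h
    obtain ⟨k, hk⟩ : ∃ k, old.length = k + 1 := by
      cases old with
      | nil => exact absurd rfl hold
      | cons a b => exact ⟨b.length, rfl⟩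
    cases l with
    | nil => simp [PySem.Chars.replace.go, repL]
    | cons c t =>
      rw [PySem.Chars.replace.go]
      by_cases hp : old.isPrefixOf (c :: t)
      · simp only [hp, if_true]
        rw [hk, List.drop_succ_cons]
        rw [ih _ _ (by simp [List.length_drop] at h ⊢; omega), repL]
        simp [hp, hk]
      · simp only [hp]
        rw [ih t (c :: acc) (by simp at h; omega), repL]
        simp [hp]

theorem replace_eq_repL (s old new : List Char) (hold : old ≠ []) :
    PySem.Chars.replace s old new = repL old new s := by
  rw [PySem.Chars.replace]
  have : old.isEmpty = false := by cases old <;> simp_all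
  rw [this]
  simp
  exact repL_go old new hold s.length s [] le_rfl

theorem prefix_repL (r : Char) (old : List Char) :
    ∀ (t q : List Char), r ∉ q → q <+: repL old [r] t → q <+: t := by
  intro t
  induction t with
  | nil => intro q _ h; simpa [repL] using h
  | cons c t ih =>
    intro q hr h
    rw [repL] at h
    by_cases hp : old.isPrefixOf (c :: t)
    · simp only [hp, if_true] at h
      cases q with
      | nil => exact List.nil_prefix
      | cons q0 qs =>
        have hq0 : q0 = r := by
          rcases h with ⟨u, hu⟩
          simpa using (congrArg (fun l => l.head?) hu.symm).symm
        subst hq0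
        exact absurd List.mem_cons_self hr
    · simp only [hp] at h
      cases q with
      | nil => exact List.nil_prefix
      | cons q0 qs =>
        rcases h with ⟨u, hu⟩
        simp only [List.cons_append] at hu
        injection hu with h1 h2
        subst h1
        exact List.cons_prefix_cons.mpr
          ⟨rfl, ih qs (fun hm => hr (List.mem_cons_of_mem _ hm)) ⟨u, h2⟩⟩

def wordPass (l : List Char) : List Char :=
  repL ['o','r'] ['|'] (repL ['x','o','r'] ['^'] (repL ['a','n','d'] ['&']
    (repL ['O','R'] ['|'] (repL ['X','O','R'] ['^'] (repL ['A','N','D'] ['&'] l)))))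

def symPass (l : List Char) : List Char :=
  repL ['('] [' ','(',' '] (repL [')'] [' ',')',' '] (repL ['/'] [' ','/',' ']
   (repL ['*'] [' ','*',' '] (repL ['-'] [' ','-',' '] (repL ['+'] [' ','+',' ']
    (repL ['^'] [' ','^',' '] (repL ['|'] [' ','|',' '] (repL ['&'] [' ','&',' '] l))))))))

theorem repL_cons_of_not_prefix (old new : List Char) (c : Char) (t : List Char)
    (h : ¬ old <+: c :: t) : repL old new (c :: t) = c :: repL old new t := by
  rw [repL]; simp [List.isPrefixOf_iff_prefix, h]

theorem wordPass_cons (c : Char) (t : List Char)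
    (h1 : ¬ ['A','N','D'] <+: c::t) (h2 : ¬ ['X','O','R'] <+: c::t)
    (h3 : ¬ ['O','R'] <+: c::t) (h4 : ¬ ['a','n','d'] <+: c::t)
    (h5 : ¬ ['x','o','r'] <+: c::t) (h6 : ¬ ['o','r'] <+: c::t) :
    wordPass (c :: t) = c :: wordPass t := by
  have p1 : ∀ q, ('&':Char) ∉ q → q <+: repL ['A','N','D'] ['&'] t → q <+: t :=
    fun q hq => prefix_repL '&' _ t q hq
  have p2 : ∀ q, ('&':Char) ∉ q → ('^':Char) ∉ q →
      q <+: repL ['X','O','R'] ['^'] (repL ['A','N','D'] ['&'] t) → q <+: t :=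
    fun q hq1 hq2 h => p1 q hq1 (prefix_repL '^' _ _ q hq2 h)
  have p3 : ∀ q, ('&':Char) ∉ q → ('^':Char) ∉ q → ('|':Char) ∉ q →
      q <+: repL ['O','R'] ['|'] (repL ['X','O','R'] ['^'] (repL ['A','N','D'] ['&'] t)) → q <+: t :=
    fun q hq1 hq2 hq3 h => p2 q hq1 hq2 (prefix_repL '|' _ _ q hq3 h)
  have p4 : ∀ q, ('&':Char) ∉ q → ('^':Char) ∉ q → ('|':Char) ∉ q →
      q <+: repL ['a','n','d'] ['&'] (repL ['O','R'] ['|'] (repL ['X','O','R'] ['^'] (repL ['A','N','D'] ['&'] t))) → q <+: t :=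
    fun q hq1 hq2 hq3 h => p3 q hq1 hq2 hq3 (prefix_repL '&' _ _ q hq1 h)
  have p5 : ∀ q, ('&':Char) ∉ q → ('^':Char) ∉ q → ('|':Char) ∉ q →
      q <+: repL ['x','o','r'] ['^'] (repL ['a','n','d'] ['&'] (repL ['O','R'] ['|'] (repL ['X','O','R'] ['^'] (repL ['A','N','D'] ['&'] t)))) → q <+: t :=
    fun q hq1 hq2 hq3 h => p4 q hq1 hq2 hq3 (prefix_repL '^' _ _ q hq2 h)
  unfold wordPass
  rw [repL_cons_of_not_prefix _ _ _ _ h1]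
  rw [repL_cons_of_not_prefix _ _ _ _ (by
    intro hp
    obtain ⟨hc, hrest⟩ := List.cons_prefix_cons.mp hp
    exact h2 (List.cons_prefix_cons.mpr ⟨hc, p1 _ (by decide) hrest⟩))]
  rw [repL_cons_of_not_prefix _ _ _ _ (by
    intro hp
    obtain ⟨hc, hrest⟩ := List.cons_prefix_cons.mp hp
    exact h3 (List.cons_prefix_cons.mpr ⟨hc, p2 _ (by decide) (by decide) hrest⟩))]
  rw [repL_cons_of_not_prefix _ _ _ _ (by
    intro hp
    obtain ⟨hc, hrest⟩ := List.cons_prefix_cons.mp hp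
    exact h4 (List.cons_prefix_cons.mpr ⟨hc, p3 _ (by decide) (by decide) (by decide) hrest⟩))]
  rw [repL_cons_of_not_prefix _ _ _ _ (by
    intro hp
    obtain ⟨hc, hrest⟩ := List.cons_prefix_cons.mp hp
    exact h5 (List.cons_prefix_cons.mpr ⟨hc, p4 _ (by decide) (by decide) (by decide) hrest⟩))]
  rw [repL_cons_of_not_prefix _ _ _ _ (by
    intro hp
    obtain ⟨hc, hrest⟩ := List.cons_prefix_cons.mp hp
    exact h6 (List.cons_prefix_cons.mpr ⟨hc, p5 _ (by decide) (by decide) (by decide) hrest⟩))]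

theorem symPass_symbol (c : Char) (X : List Char)
    (hc : c ∈ ['&', '|', '^', '+', '-', '*', '/', '(', ')']) :
    symPass (c :: X) = ' ' :: c :: ' ' :: symPass X := by
  fin_cases hc <;> simp [symPass, repL]

theorem symPass_cons_of_not_sym (c : Char) (X : List Char)
    (h : c ∉ ['&', '|', '^', '+', '-', '*', '/', '(', ')']) :
    symPass (c :: X) = c :: symPass X := by
  simp only [List.mem_cons, not_or, List.not_mem_nil, or_false] at h
  obtain ⟨h1,h2,h3,h4,h5,h6,h7,h8,h9⟩ := h
  simp [symPass, repL, List.isPrefixOf,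
    Ne.symm h1, Ne.symm h2, Ne.symm h3, Ne.symm h4, Ne.symm h5,
    Ne.symm h6, Ne.symm h7, Ne.symm h8, Ne.symm h9]

theorem main_scan : ∀ (l : List Char), symPass (wordPass l) = parsePreScan l := by
  have key : ∀ (n : Nat) (l : List Char), l.length ≤ n →
      symPass (wordPass l) = parsePreScan l := by
    intro n
    induction n with
    | zero =>
      intro l h
      have hl : l = [] := by cases l <;> simp_all
      subst hl
      simp [wordPass, symPass, repL, parsePreScan]
    | succ n ih =>
      intro l hl
      cases l with
      | nil => simp [wordPass, symPass, repL, parsePreScan]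
      | cons c t =>
        by_cases hA : ['A','N','D'] <+: c :: t
        · obtain ⟨t', ht⟩ := hA
          injection ht with e1 e2
          subst e1; subst e2
          simp only [List.append_eq, List.cons_append, List.nil_append] at hl ⊢
          rw [show wordPass ('A'::'N'::'D'::t') = '&' :: wordPass t' from by
            simp [wordPass, repL]]
          rw [symPass_symbol '&' _ (by decide)]
          rw [ih t' (by simp at hl; omega)]
          simp [parsePreScan, PySem.Chars.startswith]
        · by_cases hX : ['X','O','R'] <+: c :: t
          · obtain ⟨t', ht⟩ := hX
            injection ht with e1 e2
            subst e1; subst e2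
            simp only [List.append_eq, List.cons_append, List.nil_append] at hl ⊢
            rw [show wordPass ('X'::'O'::'R'::t') = '^' :: wordPass t' from by
              simp [wordPass, repL]]
            rw [symPass_symbol '^' _ (by decide)]
            rw [ih t' (by simp at hl; omega)]
            simp [parsePreScan, PySem.Chars.startswith]
          · by_cases hO : ['O','R'] <+: c :: t
            · obtain ⟨t', ht⟩ := hO
              injection ht with e1 e2
              subst e1; subst e2
              simp only [List.append_eq, List.cons_append, List.nil_append] at hl ⊢
              rw [show wordPass ('O'::'R'::t') = '|' :: wordPass t' from by
                simp [wordPass, repL]]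
              rw [symPass_symbol '|' _ (by decide)]
              rw [ih t' (by simp at hl; omega)]
              simp [parsePreScan, PySem.Chars.startswith]
            · by_cases ha : ['a','n','d'] <+: c :: t
              · obtain ⟨t', ht⟩ := ha
                injection ht with e1 e2
                subst e1; subst e2
                simp only [List.append_eq, List.cons_append, List.nil_append] at hl ⊢
                rw [show wordPass ('a'::'n'::'d'::t') = '&' :: wordPass t' from by
                  simp [wordPass, repL]]
                rw [symPass_symbol '&' _ (by decide)]
                rw [ih t' (by simp at hl; omega)]
                simp [parsePreScan, PySem.Chars.startswith]
              · by_cases hx : ['x','o','r'] <+: c :: t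
                · obtain ⟨t', ht⟩ := hx
                  injection ht with e1 e2
                  subst e1; subst e2
                  simp only [List.append_eq, List.cons_append, List.nil_append] at hl ⊢
                  rw [show wordPass ('x'::'o'::'r'::t') = '^' :: wordPass t' from by
                    simp [wordPass, repL]]
                  rw [symPass_symbol '^' _ (by decide)]
                  rw [ih t' (by simp at hl; omega)]
                  simp [parsePreScan, PySem.Chars.startswith]
                · by_cases ho : ['o','r'] <+: c :: t
                  · obtain ⟨t', ht⟩ := ho
                    injection ht with e1 e2
                    subst e1; subst e2
                    simp only [List.append_eq, List.cons_append, List.nil_append] at hl ⊢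
                    rw [show wordPass ('o'::'r'::t') = '|' :: wordPass t' from by
                      simp [wordPass, repL]]
                    rw [symPass_symbol '|' _ (by decide)]
                    rw [ih t' (by simp at hl; omega)]
                    simp [parsePreScan, PySem.Chars.startswith]
                  · rw [wordPass_cons c t hA hX hO ha hx ho]
                    by_cases hs : c ∈ ['&', '|', '^', '+', '-', '*', '/', '(', ')']
                    · rw [symPass_symbol c _ hs]
                      rw [ih t (by simp at hl; omega)]
                      rw [parsePreScan]
                      simp only [PySem.Chars.startswith, List.isPrefixOf_iff_prefix]
                      simp [hA, hX, hO, ha, hx, ho, hs]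
                    · rw [symPass_cons_of_not_sym c _ hs]
                      rw [ih t (by simp at hl; omega)]
                      rw [parsePreScan]
                      simp only [PySem.Chars.startswith, List.isPrefixOf_iff_prefix]
                      simp [hA, hX, hO, ha, hx, ho, hs]
  intro l; exact key l.length l le_rfl


-- ===== VERDICT (by name: the statement is the Claim_ definition above) =====
theorem parse_pre_spec : Claim_equal_parse_pre := by
  intro data _
  unfold Spec_parse_pre parse_pre parse_pre_alt
  simp only [List.foldl_cons, List.foldl_nil]
  simp only [PySem.Str.replace, String.toList_ofList]
  rw [← main_scan data.toList]
  unfold wordPass symPass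
  rw [replace_eq_repL _ _ _ (by decide), replace_eq_repL _ _ _ (by decide),
      replace_eq_repL _ _ _ (by decide), replace_eq_repL _ _ _ (by decide),
      replace_eq_repL _ _ _ (by decide), replace_eq_repL _ _ _ (by decide),
      replace_eq_repL _ _ _ (by decide), replace_eq_repL _ _ _ (by decide),
      replace_eq_repL _ _ _ (by decide), replace_eq_repL _ _ _ (by decide),
      replace_eq_repL _ _ _ (by decide), replace_eq_repL _ _ _ (by decide),
      replace_eq_repL _ _ _ (by decide), replace_eq_repL _ _ _ (by decide),
      replace_eq_repL _ _ _ (by decide)]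
  simp only [show ("AND" : String).toList = ['A','N','D'] from by decide, show ("XOR" : String).toList = ['X','O','R'] from by decide, show ("OR" : String).toList = ['O','R'] from by decide, show ("and" : String).toList = ['a','n','d'] from by decide, show ("xor" : String).toList = ['x','o','r'] from by decide, show ("or" : String).toList = ['o','r'] from by decide, show ("&" : String).toList = ['&'] from by decide, show ("^" : String).toList = ['^'] from by decide, show ("|" : String).toList = ['|'] from by decide, show ("+" : String).toList = ['+'] from by decide, show ("-" : String).toList = ['-'] from by decide, show ("*" : String).toList = ['*'] from by decide, show ("/" : String).toList = ['/'] from by decide, show ("(" : String).toList = ['('] from by decide, show (")" : String).toList = [')'] from by decide, show (" " : String).toList = [' '] from by decide, String.toList_append, List.cons_append, List.nil_append]
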